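-- pv_equiv track=rewrite | github.com/krinalsuthar/code-translator | app.py | c_to_js
-- ===== SOURCE A (Python) =====
-- def c_to_js(c_code):
--     """Translate C code to JavaScript."""
--     replacements = {
--         "printf(": "console.log(",  # Print statements
--         "int main()": "function main()",  # Main function
--         "char*": "let ",  # Strings in C map to let variables
--         ";": "",  # Optional semicolons in JavaScript
--     }
--
--     js_code = []
--     for line in c_code.splitlines():
--         for c, js in replacements.items():
--             line = line.replace(c, js)
--         js_code.append(line.strip())
--
--     return "\n".join(js_code)
-- ===== SOURCE B (Python) =====
-- def _apply(line, pairs):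
--     """Apply each (old, new) substitution via the split/join idiom."""
--     if not pairs:
--         return line
--     old, new = pairs[0]
--     return _apply(new.join(line.split(old)), pairs[1:])
--
--
-- def c_to_js(c_code):
--     """Translate C code to JavaScript."""
--     pairs = [
--         ("printf(", "console.log("),
--         ("int main()", "function main()"),
--         ("char*", "let "),
--         (";", ""),
--     ]
--     return "\n".join(_apply(line, pairs).strip() for line in c_code.splitlines())
-- ===== Notes on version B (the rewrite author's own statement) =====
-- stated objective: alternative
-- what changed: B performs each substitution with the split/join idiom (new.join(line.split(old))) applied by a recursive helper over the replacement pairs, and builds the output by mapping over the lines instead of A's nested dict-items loop with an accumulate-append list.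
import Mathlib
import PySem

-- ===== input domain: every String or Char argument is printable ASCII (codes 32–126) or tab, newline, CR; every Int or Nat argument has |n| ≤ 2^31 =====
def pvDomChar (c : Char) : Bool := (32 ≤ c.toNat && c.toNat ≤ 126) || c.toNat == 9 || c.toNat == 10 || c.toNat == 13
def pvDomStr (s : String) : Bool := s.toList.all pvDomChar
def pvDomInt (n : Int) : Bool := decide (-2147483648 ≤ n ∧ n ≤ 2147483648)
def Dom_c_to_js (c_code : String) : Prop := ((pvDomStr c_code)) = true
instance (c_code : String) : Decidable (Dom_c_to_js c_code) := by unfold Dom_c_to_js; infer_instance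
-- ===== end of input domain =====

-- B replaces each str.replace with the split/join idiom applied by a recursive helper over the
-- replacement pairs, and builds the output by mapping over the lines instead of A's accumulate-append
-- loop (objective: alternative decomposition, same cost).

-- ===== PORT A =====
-- The replacements dict (iterated via .items() in insertion order) is the association list below.
def pvRepl : List (String × String) :=
  [("printf(", "console.log("), ("int main()", "function main()"), ("char*", "let "), (";", "")]

def c_to_js (c_code : String) : String :=
  let js_code := (PySem.Str.splitlines c_code).foldl
    (fun acc line =>
      acc ++ [PySem.Str.strip (pvRepl.foldl (fun l p => PySem.Str.replace l p.1 p.2) line)]) []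
  PySem.Str.join "\n" js_code

-- ===== PORT B =====
-- B's own literal pair list (the same four substitutions, as in Source B).
def pvPairs : List (String × String) :=
  [("printf(", "console.log("), ("int main()", "function main()"), ("char*", "let "), (";", "")]

-- line.split(old) is ported with PySem.Str.split? (none only for old = ""; every separator in the
-- literal pair list is nonempty, so the .getD [] default is never taken — exact on all inputs).
def pvApply : String → List (String × String) → String
  | line, [] => line
  | line, (old, new) :: rest =>
      pvApply (PySem.Str.join new ((PySem.Str.split? line old).getD [])) rest

def c_to_js_alt (c_code : String) : String :=
  PySem.Str.join "\n"
    ((PySem.Str.splitlines c_code).map (fun line => PySem.Str.strip (pvApply line pvPairs)))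

-- ===== PRECONDITION & SPEC =====
def Spec_c_to_js (c_code : String) (out : String) : Prop := out = c_to_js_alt c_code
instance (c_code : String) (out : String) : Decidable (Spec_c_to_js c_code out) := by unfold Spec_c_to_js; infer_instance

-- ===== CLAIM (what is proved, stated in full; the proofs are below) =====
def Claim_equal_c_to_js : Prop := ∀ (c_code : String), Dom_c_to_js c_code → Spec_c_to_js c_code (c_to_js c_code)

-- ===== LEMMAS AND PROOFS =====

-- splitOn.go never returns the empty list
theorem pv_splitOn_go_ne_nil (sep : List Char) (fuel : Nat) (l cur : List Char)
    (acc : List (List Char)) : PySem.Chars.splitOn.go sep fuel l cur acc ≠ [] := by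
  induction fuel generalizing l cur acc with
  | zero => simp [PySem.Chars.splitOn.go]
  | succ fuel ih =>
    cases l with
    | nil => simp [PySem.Chars.splitOn.go]
    | cons c rest =>
      rw [PySem.Chars.splitOn.go]
      split
      · exact ih _ _ _
      · exact ih _ _ _

-- accumulator/current-piece extraction for splitOn.go
theorem pv_splitOn_go_acc (sep : List Char) (fuel : Nat) (l cur : List Char)
    (acc : List (List Char)) :
    PySem.Chars.splitOn.go sep fuel l cur acc =
      acc.reverse ++ (PySem.Chars.splitOn.go sep fuel l [] []).modifyHead (cur.reverse ++ ·) := by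
  induction fuel generalizing l cur acc with
  | zero => simp [PySem.Chars.splitOn.go]
  | succ fuel ih =>
    cases l with
    | nil => simp [PySem.Chars.splitOn.go]
    | cons c rest =>
      rw [PySem.Chars.splitOn.go]
      rw [show PySem.Chars.splitOn.go sep (fuel + 1) (c :: rest) [] [] =
            if sep.isPrefixOf (c :: rest) = true then
              PySem.Chars.splitOn.go sep fuel (List.drop sep.length (c :: rest)) [] [[].reverse]
            else PySem.Chars.splitOn.go sep fuel rest [c] [] from by
        rw [PySem.Chars.splitOn.go]]
      split
      · rw [ih _ [] (cur.reverse :: acc), ih _ [] [[].reverse]]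
        obtain ⟨h, t, hht⟩ :
            ∃ h t, PySem.Chars.splitOn.go sep fuel (List.drop sep.length (c :: rest)) [] [] = h :: t := by
          cases hq : PySem.Chars.splitOn.go sep fuel (List.drop sep.length (c :: rest)) [] [] with
          | nil => exact absurd hq (pv_splitOn_go_ne_nil _ _ _ _ _)
          | cons h t => exact ⟨h, t, rfl⟩
        simp [hht]
      · rw [ih rest (c :: cur) acc, ih rest [c] []]
        obtain ⟨h, t, hht⟩ :
            ∃ h t, PySem.Chars.splitOn.go sep fuel rest [] [] = h :: t := by
          cases hq : PySem.Chars.splitOn.go sep fuel rest [] [] with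
          | nil => exact absurd hq (pv_splitOn_go_ne_nil _ _ _ _ _)
          | cons h t => exact ⟨h, t, rfl⟩
        simp [hht]

-- join distributes over a prepend to the head piece
theorem pv_join_modifyHead (new p h : List Char) (t : List (List Char)) :
    PySem.Chars.join new ((h :: t).modifyHead (p ++ ·)) = p ++ PySem.Chars.join new (h :: t) := by
  cases t with
  | nil => simp [PySem.Chars.join, List.intercalate]
  | cons b t' => simp [PySem.Chars.join, List.intercalate]

-- the split/join idiom computes replace (greedy left-to-right scan, sep ≠ [])
theorem pv_replace_go_eq (old new : List Char) (hold : old ≠ [])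
    (fuel : Nat) (l acc : List Char) (hlen : l.length ≤ fuel) :
    PySem.Chars.replace.go old new fuel l acc =
      acc.reverse ++ PySem.Chars.join new (PySem.Chars.splitOn.go old (fuel + 1) l [] []) := by
  induction fuel generalizing l acc with
  | zero =>
    have : l = [] := List.eq_nil_of_length_eq_zero (Nat.le_zero.mp hlen)
    subst this
    simp [PySem.Chars.replace.go, PySem.Chars.splitOn.go, PySem.Chars.join, List.intercalate]
  | succ fuel ih =>
    cases l with
    | nil =>
      simp [PySem.Chars.replace.go, PySem.Chars.splitOn.go, PySem.Chars.join, List.intercalate]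
    | cons c rest =>
      rw [PySem.Chars.replace.go]
      rw [show PySem.Chars.splitOn.go old (fuel + 1 + 1) (c :: rest) [] [] =
            if old.isPrefixOf (c :: rest) = true then
              PySem.Chars.splitOn.go old (fuel + 1) (List.drop old.length (c :: rest)) [] [[].reverse]
            else PySem.Chars.splitOn.go old (fuel + 1) rest [c] [] from by
        rw [PySem.Chars.splitOn.go]]
      split
      · have hlen' : (List.drop old.length (c :: rest)).length ≤ fuel := by
          have : 1 ≤ old.length := by
            cases old with
            | nil => exact absurd rfl hold
            | cons _ _ => simp
          simp only [List.length_drop, List.length_cons] at *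
          omega
        rw [ih _ _ hlen']
        rw [pv_splitOn_go_acc old (fuel + 1) (List.drop old.length (c :: rest)) [] [[].reverse]]
        obtain ⟨h, t, hht⟩ :
            ∃ h t, PySem.Chars.splitOn.go old (fuel + 1) (List.drop old.length (c :: rest)) [] [] = h :: t := by
          cases hq : PySem.Chars.splitOn.go old (fuel + 1) (List.drop old.length (c :: rest)) [] [] with
          | nil => exact absurd hq (pv_splitOn_go_ne_nil _ _ _ _ _)
          | cons h t => exact ⟨h, t, rfl⟩
        simp [hht, PySem.Chars.join, List.intercalate]
      · have hlen' : rest.length ≤ fuel := by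
          simp only [List.length_cons] at hlen; omega
        rw [ih _ _ hlen']
        rw [pv_splitOn_go_acc old (fuel + 1) rest [c] []]
        obtain ⟨h, t, hht⟩ :
            ∃ h t, PySem.Chars.splitOn.go old (fuel + 1) rest [] [] = h :: t := by
          cases hq : PySem.Chars.splitOn.go old (fuel + 1) rest [] [] with
          | nil => exact absurd hq (pv_splitOn_go_ne_nil _ _ _ _ _)
          | cons h t => exact ⟨h, t, rfl⟩
        rw [hht]
        simp only [List.reverse_cons, List.reverse_nil, List.nil_append]
        rw [pv_join_modifyHead]
        simp

-- chars-level: join new (splitOn s old) = replace s old new for old ≠ []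
theorem pv_join_splitOn (s old new : List Char) (hold : old ≠ []) :
    PySem.Chars.join new (PySem.Chars.splitOn s old) = PySem.Chars.replace s old new := by
  have h := pv_replace_go_eq old new hold s.length s [] le_rfl
  simp only [List.reverse_nil, List.nil_append] at h
  rw [PySem.Chars.replace, PySem.Chars.splitOn, if_neg (by simp [hold]), h]

-- string-level step: the split/join idiom equals Str.replace for a nonempty separator
theorem pv_step (line old new : String) (hold : old.toList ≠ []) :
    PySem.Str.join new ((PySem.Str.split? line old).getD []) = PySem.Str.replace line old new := by
  have hne : old.toList.isEmpty = false := by simp [hold]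
  simp only [PySem.Str.join, PySem.Str.split?, PySem.Chars.split?, PySem.Str.replace, hne,
    Bool.false_eq_true, if_false, Option.map_some, Option.getD_some, List.map_map]
  have hcomp : (String.toList ∘ String.ofList) = id := by funext cs; simp
  rw [hcomp, List.map_id, pv_join_splitOn _ _ _ hold]

-- per-line: B's recursive pair application equals A's foldl of replace over the literal list
theorem pv_line (line : String) :
    pvApply line pvPairs = pvRepl.foldl (fun l p => PySem.Str.replace l p.1 p.2) line := by
  simp only [pvRepl, pvPairs, pvApply, List.foldl]
  rw [pv_step _ _ _ (by decide), pv_step _ _ _ (by decide), pv_step _ _ _ (by decide),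
    pv_step _ _ _ (by decide)]

-- ===== VERDICT (by name: the statement is the Claim_ definition above) =====
theorem c_to_js_spec : Claim_equal_c_to_js := by
  intro c _
  unfold Spec_c_to_js c_to_js c_to_js_alt
  simp only [pv_line]
  rw [PySem.List.foldl_append_singleton_eq_map]
  simp
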